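-- pv_equiv track=rewrite | github.com/andrmich/py_checkio | documented/the_ship_teams.py | two_teams
-- ===== SOURCE A (Python) =====
-- def two_teams(sailors):
--     first_ship = []
--     second_ship = []
--     for key, value in sailors.items():
--         if value > 40 or value < 20:
--             first_ship.append(key)
--         else:
--             second_ship.append(key)
--     return [sorted(first_ship), sorted(second_ship)]
-- ===== SOURCE B (Python) =====
-- def _ins(lst, x):
--     # insert x into sorted list lst, after any equal elements
--     if not lst or x < lst[0]:
--         return [x] + lst
--     return [lst[0]] + _ins(lst[1:], x)
--
--
-- def two_teams(sailors):
--     first = []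
--     second = []
--     for key, value in sailors.items():
--         if value > 40 or value < 20:
--             first = _ins(first, key)
--         else:
--             second = _ins(second, key)
--     return [first, second]
-- ===== Notes on version B (the rewrite author's own statement) =====
-- stated objective: alternative
-- what changed: B never calls sorted(): it maintains each team as an always-sorted list, inserting every key at its sorted position with a recursive sorted-insert as it iterates, instead of A's append-partition followed by sorting each half.
import Mathlib
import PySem

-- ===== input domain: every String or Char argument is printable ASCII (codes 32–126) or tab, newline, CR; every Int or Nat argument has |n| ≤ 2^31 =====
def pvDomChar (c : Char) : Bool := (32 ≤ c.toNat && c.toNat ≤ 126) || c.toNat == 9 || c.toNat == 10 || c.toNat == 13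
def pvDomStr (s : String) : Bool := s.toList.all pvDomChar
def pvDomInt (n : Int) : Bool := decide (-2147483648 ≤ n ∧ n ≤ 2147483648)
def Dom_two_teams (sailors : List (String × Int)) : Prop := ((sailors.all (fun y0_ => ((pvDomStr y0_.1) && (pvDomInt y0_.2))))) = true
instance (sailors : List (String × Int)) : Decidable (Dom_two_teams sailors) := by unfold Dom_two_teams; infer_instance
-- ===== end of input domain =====

-- B replaces A's partition-then-sort-each-half by online insertion sort: each key is inserted at
-- its sorted position in the right team as we iterate, and sorted() is never called (alternative).

-- ===== PORT A =====
def two_teams (sailors : List (String × Int)) : List (List String) :=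
  let st := sailors.foldl
    (fun (st : List String × List String) kv =>
      if 40 < kv.2 ∨ kv.2 < 20 then (st.1 ++ [kv.1], st.2) else (st.1, st.2 ++ [kv.1]))
    ([], [])
  [PySem.List.sorted st.1 (fun x => x) false, PySem.List.sorted st.2 (fun x => x) false]

-- ===== PORT B =====
-- _ins: insert x into the sorted list lst, after any equal elements (recursive, as in Source B)
def pvIns (lst : List String) (x : String) : List String :=
  match lst with
  | [] => [x]
  | y :: ys => if x < y then x :: y :: ys else y :: pvIns ys x

def two_teams_alt (sailors : List (String × Int)) : List (List String) :=
  let st := sailors.foldl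
    (fun (st : List String × List String) kv =>
      if 40 < kv.2 ∨ kv.2 < 20 then (pvIns st.1 kv.1, st.2) else (st.1, pvIns st.2 kv.1))
    ([], [])
  [st.1, st.2]

-- ===== PRECONDITION & SPEC =====
-- Pre_ excludes lists with duplicate keys: a Python dict cannot hold them (a literal collapses to
-- the last value), so such assoc lists encode no Python input — the corner is an artefact of the
-- assoc-list encoding of dicts, not of either program.
def Pre_two_teams (sailors : List (String × Int)) : Prop := (sailors.map Prod.fst).Nodup
instance (sailors : List (String × Int)) : Decidable (Pre_two_teams sailors) := by unfold Pre_two_teams; infer_instance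

def pvWitness_two_teams : (List (String × Int)) := [("ann", 35), ("bob", 50), ("cy", 19)]

def Spec_two_teams (sailors : List (String × Int)) (out : List (List String)) : Prop := out = two_teams_alt sailors
instance (sailors : List (String × Int)) (out : List (List String)) : Decidable (Spec_two_teams sailors out) := by unfold Spec_two_teams; infer_instance

-- ===== CLAIM (what is proved, stated in full; the proofs are below) =====
def Claim_equal_two_teams : Prop := ∀ (sailors : List (String × Int)), Dom_two_teams sailors → Pre_two_teams sailors → Spec_two_teams sailors (two_teams sailors)

-- ===== LEMMAS AND PROOFS =====

-- A's fold accumulates exactly the filtered key lists (accumulator-generalised)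
theorem pvFoldA (sailors : List (String × Int)) (a b : List String) :
    sailors.foldl
      (fun (st : List String × List String) kv =>
        if 40 < kv.2 ∨ kv.2 < 20 then (st.1 ++ [kv.1], st.2) else (st.1, st.2 ++ [kv.1]))
      (a, b)
    = (a ++ (sailors.filter (fun kv => decide (40 < kv.2 ∨ kv.2 < 20))).map Prod.fst,
       b ++ (sailors.filter (fun kv => !decide (40 < kv.2 ∨ kv.2 < 20))).map Prod.fst) := by
  induction sailors generalizing a b with
  | nil => simp
  | cons kv rest ih =>
    by_cases h : 40 < kv.2 ∨ kv.2 < 20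
    · simp only [List.foldl_cons, if_pos h, ih, List.filter_cons]
      rw [if_pos (by simp [h]), if_neg (by simp [h])]
      simp
    · simp only [List.foldl_cons, if_neg h, ih, List.filter_cons]
      rw [if_neg (by simp [h]), if_pos (by simp [h])]
      simp

theorem pvIns_perm (lst : List String) (x : String) : (pvIns lst x).Perm (x :: lst) := by
  induction lst with
  | nil => simp [pvIns]
  | cons y ys ih =>
    unfold pvIns
    split_ifs
    · exact List.Perm.refl _
    · exact (List.Perm.cons y ih).trans (List.Perm.swap x y ys)

theorem pvIns_sorted (lst : List String) (x : String)
    (h : lst.Pairwise (· ≤ ·)) : (pvIns lst x).Pairwise (· ≤ ·) := by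
  induction lst with
  | nil => simp [pvIns]
  | cons y ys ih =>
    rcases List.pairwise_cons.mp h with ⟨hy, hys⟩
    unfold pvIns
    split_ifs with hlt
    · refine List.pairwise_cons.mpr ⟨?_, h⟩
      intro b hb
      rcases List.mem_cons.mp hb with rfl | hb
      · exact le_of_lt hlt
      · exact le_trans (le_of_lt hlt) (hy b hb)
    · refine List.pairwise_cons.mpr ⟨?_, ih hys⟩
      intro b hb
      have hb' : b = x ∨ b ∈ ys := by
        simpa using (pvIns_perm ys x).mem_iff.mp hb
      rcases hb' with rfl | hb'
      · exact le_of_not_gt hlt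
      · exact hy b hb'

-- B's fold: each team stays sorted and is a permutation of the filtered key list
theorem pvFoldB (sailors : List (String × Int)) (a b : List String)
    (ha : a.Pairwise (· ≤ ·)) (hb : b.Pairwise (· ≤ ·)) :
    let r := sailors.foldl
      (fun (st : List String × List String) kv =>
        if 40 < kv.2 ∨ kv.2 < 20 then (pvIns st.1 kv.1, st.2) else (st.1, pvIns st.2 kv.1))
      (a, b)
    r.1.Perm (a ++ (sailors.filter (fun kv => decide (40 < kv.2 ∨ kv.2 < 20))).map Prod.fst)
    ∧ r.2.Perm (b ++ (sailors.filter (fun kv => !decide (40 < kv.2 ∨ kv.2 < 20))).map Prod.fst)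
    ∧ r.1.Pairwise (· ≤ ·) ∧ r.2.Pairwise (· ≤ ·) := by
  induction sailors generalizing a b with
  | nil => exact ⟨by simp, by simp, ha, hb⟩
  | cons kv rest ih =>
    by_cases h : 40 < kv.2 ∨ kv.2 < 20
    · simp only [List.foldl_cons, if_pos h, List.filter_cons]
      rw [if_pos (by simp [h]), if_neg (by simp [h])]
      obtain ⟨h1, h2, h3, h4⟩ := ih (pvIns a kv.1) b (pvIns_sorted a kv.1 ha) hb
      refine ⟨?_, h2, h3, h4⟩
      exact h1.trans (((pvIns_perm a kv.1).append_right _).trans List.perm_middle.symm)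
    · simp only [List.foldl_cons, if_neg h, List.filter_cons]
      rw [if_neg (by simp [h]), if_pos (by simp [h])]
      obtain ⟨h1, h2, h3, h4⟩ := ih a (pvIns b kv.1) ha (pvIns_sorted b kv.1 hb)
      refine ⟨h1, ?_, h3, h4⟩
      exact h2.trans (((pvIns_perm b kv.1).append_right _).trans List.perm_middle.symm)

-- a sorted permutation of xs with no duplicates IS PySem's sorted xs
theorem pvSortedChar (xs ys : List String) (hperm : ys.Perm xs)
    (hpw : ys.Pairwise (· ≤ ·)) (hnd : ys.Nodup) :
    PySem.List.sorted xs (fun x => x) false = ys := by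
  refine PySem.List.sorted_eq_of_perm_of_pairwise_lt _ _ _ hperm ?_
  have := List.Pairwise.and hpw hnd
  exact this.imp (fun h => lt_of_le_of_ne h.1 h.2)

theorem pvSideEq (sailors : List (String × Int)) (hnd : (sailors.map Prod.fst).Nodup) :
    two_teams sailors = two_teams_alt sailors := by
  unfold two_teams two_teams_alt
  rw [pvFoldA sailors [] []]
  obtain ⟨h1, h2, h3, h4⟩ := pvFoldB sailors [] [] (by simp) (by simp)
  simp only [List.nil_append] at h1 h2 ⊢
  have hsub : ∀ q : String × Int → Bool,
      ((sailors.filter q).map Prod.fst).Sublist (sailors.map Prod.fst) :=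
    fun q => List.Sublist.map Prod.fst List.filter_sublist
  rw [pvSortedChar _ _ h1 h3 (h1.nodup_iff.mpr ((hsub _).nodup hnd)),
      pvSortedChar _ _ h2 h4 (h2.nodup_iff.mpr ((hsub _).nodup hnd))]

-- ===== VERDICT (by name: the statement is the Claim_ definition above) =====
theorem two_teams_spec : Claim_equal_two_teams := by
  intro sailors _ hpre
  exact pvSideEq sailors hpre
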